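-- pv_equiv track=rewrite | github.com/davidpaul551/Training_Courses | Langchain/react-Langchain/main.py | parse_agent_output
-- ===== SOURCE A (Python) =====
-- def parse_agent_output(output: str):
--     lines = output.strip().split("\n")
--     action = None
--     action_input = None
--     for line in lines:
--         if line.startswith("Action:"):
--             action = line.split(":", 1)[1].strip()
--         elif line.startswith("Action Input:"):
--             action_input = line.split(":", 1)[1].strip()
--     return {"tool": action, "tool_input": action_input}
-- ===== SOURCE B (Python) =====
-- def parse_agent_output(output: str):
--     lines = output.strip().split("\n")
--
--     def last_value(prefix):
--         # scan back-to-front, first hit wins (= A's last-overwrite-wins)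
--         for line in reversed(lines):
--             if line.startswith(prefix):
--                 return line.split(":", 1)[1].strip()
--         return None
--
--     return {"tool": last_value("Action:"), "tool_input": last_value("Action Input:")}
-- ===== Notes on version B (the rewrite author's own statement) =====
-- stated objective: alternative
-- what changed: Replaces A's single forward pass that overwrites two accumulators with two backward early-exit scans over reversed(lines), returning the first (i.e. last) matching line per prefix.
import Mathlib
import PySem

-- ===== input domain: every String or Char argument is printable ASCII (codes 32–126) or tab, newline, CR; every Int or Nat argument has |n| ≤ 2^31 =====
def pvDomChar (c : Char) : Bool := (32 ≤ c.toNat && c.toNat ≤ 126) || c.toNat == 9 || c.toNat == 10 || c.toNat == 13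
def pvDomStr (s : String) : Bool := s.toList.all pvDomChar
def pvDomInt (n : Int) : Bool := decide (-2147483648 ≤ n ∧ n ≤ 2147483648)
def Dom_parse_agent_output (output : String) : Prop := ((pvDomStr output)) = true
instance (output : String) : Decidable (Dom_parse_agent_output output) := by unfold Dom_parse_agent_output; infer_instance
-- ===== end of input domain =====

-- B replaces A's forward fold over two accumulators by two backward early-exit scans; same return value, no side effects.

-- shared helper: line.split(":", 1)[1].strip() — the [1] index exists whenever the
-- startswith branch fired (the line then contains ':'), so pyGetD's default is unreachable
def pvExtract (line : String) : String :=
  PySem.Str.strip (PySem.List.pyGetD ((PySem.Str.splitMax? line ":" 1).getD []) 1 "")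

-- ===== PORT A =====
def parse_agent_output (output : String) : List (String × Option String) :=
  let lines := (PySem.Str.split? (PySem.Str.strip output) "\n").getD []
  let st := lines.foldl (fun (st : Option String × Option String) line =>
      if PySem.Str.startswith line "Action:" then (some (pvExtract line), st.2)
      else if PySem.Str.startswith line "Action Input:" then (st.1, some (pvExtract line))
      else st) (none, none)
  [("tool", st.1), ("tool_input", st.2)]

-- ===== PORT B =====
-- for line in reversed(lines): if line.startswith(prefix): return …; return None
def lastValueRev (pre : String) : List String → Option String
  | [] => none
  | l :: rest => if PySem.Str.startswith l pre then some (pvExtract l) else lastValueRev pre rest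

def parse_agent_output_alt (output : String) : List (String × Option String) :=
  let lines := (PySem.Str.split? (PySem.Str.strip output) "\n").getD []
  [("tool", lastValueRev "Action:" lines.reverse),
   ("tool_input", lastValueRev "Action Input:" lines.reverse)]

-- ===== PRECONDITION & SPEC =====
def Spec_parse_agent_output (output : String) (out : List (String × Option String)) : Prop := out = parse_agent_output_alt output
instance (output : String) (out : List (String × Option String)) : Decidable (Spec_parse_agent_output output out) := by unfold Spec_parse_agent_output; infer_instance

-- ===== CLAIM (what is proved, stated in full; the proofs are below) =====
def Claim_equal_parse_agent_output : Prop := ∀ (output : String), Dom_parse_agent_output output → Spec_parse_agent_output output (parse_agent_output output)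

-- ===== LEMMAS AND PROOFS =====

-- a line cannot start with both "Action Input:" and "Action:" (they differ at index 6)
theorem pv_no_both (l : String) (h2 : PySem.Str.startswith l "Action Input:" = true) :
    PySem.Str.startswith l "Action:" = false := by
  by_contra h
  rw [Bool.not_eq_false] at h
  rw [PySem.Str.startswith_eq, PySem.Chars.startswith_iff] at h h2
  have hle : ("Action:".toList).length ≤ ("Action Input:".toList).length := by decide
  have := List.prefix_of_prefix_length_le h h2 hle
  revert this; decide

theorem pv_fst_proj (lines : List String) :
    ∀ st : Option String × Option String,
    (lines.foldl (fun (st : Option String × Option String) line =>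
      if PySem.Str.startswith line "Action:" then (some (pvExtract line), st.2)
      else if PySem.Str.startswith line "Action Input:" then (st.1, some (pvExtract line))
      else st) st).1
    = lines.foldl (fun a line => if PySem.Str.startswith line "Action:" then some (pvExtract line) else a) st.1 := by
  induction lines with
  | nil => intro st; rfl
  | cons l rest ih =>
    intro st
    simp only [List.foldl_cons]
    split_ifs with h1 h2 <;> exact ih _

theorem pv_snd_proj (lines : List String) :
    ∀ st : Option String × Option String,
    (lines.foldl (fun (st : Option String × Option String) line =>
      if PySem.Str.startswith line "Action:" then (some (pvExtract line), st.2)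
      else if PySem.Str.startswith line "Action Input:" then (st.1, some (pvExtract line))
      else st) st).2
    = lines.foldl (fun a line => if PySem.Str.startswith line "Action Input:" then some (pvExtract line) else a) st.2 := by
  induction lines with
  | nil => intro st; rfl
  | cons l rest ih =>
    intro st
    simp only [List.foldl_cons]
    by_cases h2 : PySem.Str.startswith l "Action Input:" = true
    · rw [pv_no_both l h2]
      simp only [Bool.false_eq_true, if_false, h2, if_true]
      exact ih _
    · have h2' : PySem.Str.startswith l "Action Input:" = false := by
        simpa using h2
      simp only [h2', Bool.false_eq_true, if_false]
      split_ifs with h1 <;> exact ih _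

theorem pv_scan (pre : String) (lines : List String) (init : Option String) :
    lines.foldl (fun a line => if PySem.Str.startswith line pre then some (pvExtract line) else a) init
    = Option.or (lastValueRev pre lines.reverse) init := by
  induction lines using List.reverseRecOn with
  | nil => rfl
  | append_singleton xs x ih =>
    rw [List.foldl_append, List.reverse_append]
    simp only [List.foldl_cons, List.foldl_nil, List.reverse_singleton, List.singleton_append,
      lastValueRev]
    split_ifs with h
    · rfl
    · exact ih

-- ===== VERDICT (by name: the statement is the Claim_ definition above) =====
theorem parse_agent_output_spec : Claim_equal_parse_agent_output := by
  intro output _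
  unfold Spec_parse_agent_output parse_agent_output parse_agent_output_alt
  simp only []
  have h1 := pv_fst_proj ((PySem.Str.split? (PySem.Str.strip output) "\n").getD []) (none, none)
  have h2 := pv_snd_proj ((PySem.Str.split? (PySem.Str.strip output) "\n").getD []) (none, none)
  rw [h1, h2, pv_scan, pv_scan, Option.or_none, Option.or_none]
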